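-- pv_equiv track=rewrite | github.com/JonghyunLEE12/SWEA | 프로그래머스/unrated/133499. 옹알이 （2）/옹알이 （2）.py | solution
-- ===== SOURCE A (Python) =====
-- def solution(babbling):
--     ans = 0
--
--     baby = ['aya','ye','woo','ma']
--
--     rlt = []
--
--     def dfs(target,prev_word):
--         if len(target) == 0:
--             return 1
--
--         count = 0
--         for sound in baby:
--             if target.startswith(sound) and prev_word != sound:
--                 count += dfs(target[len(sound):],sound)
--         return count
--
--     for target in babbling:
--         rlt.append(dfs(target,""))
--
--     return sum(rlt)
-- ===== SOURCE B (Python) =====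
-- def solution(babbling):
--     # Deterministic dispatch on the first letter: the four sounds start with
--     # distinct letters, so a dict keyed by first character picks the only
--     # candidate sound; a word is valid iff that greedy tokenization consumes it
--     # without repeating a sound.
--     step = {'a': 'aya', 'y': 'ye', 'w': 'woo', 'm': 'ma'}
--
--     def ok(s, prev):
--         if not s:
--             return True
--         w = step.get(s[0])
--         if w is None or w == prev or not s.startswith(w):
--             return False
--         return ok(s[len(w):], w)
--
--     return sum(1 for s in babbling if ok(s, ''))
-- ===== Notes on version B (the rewrite author's own statement) =====
-- stated objective: alternative
-- what changed: Replaced A's branching recursive DFS that tries and sums counts over all four candidate sounds at every position with a deterministic scan that dispatches on the first character through a dict to the unique possible sound (the four sounds start with distinct letters), returning a boolean per word and counting the valid words.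
import Mathlib
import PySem

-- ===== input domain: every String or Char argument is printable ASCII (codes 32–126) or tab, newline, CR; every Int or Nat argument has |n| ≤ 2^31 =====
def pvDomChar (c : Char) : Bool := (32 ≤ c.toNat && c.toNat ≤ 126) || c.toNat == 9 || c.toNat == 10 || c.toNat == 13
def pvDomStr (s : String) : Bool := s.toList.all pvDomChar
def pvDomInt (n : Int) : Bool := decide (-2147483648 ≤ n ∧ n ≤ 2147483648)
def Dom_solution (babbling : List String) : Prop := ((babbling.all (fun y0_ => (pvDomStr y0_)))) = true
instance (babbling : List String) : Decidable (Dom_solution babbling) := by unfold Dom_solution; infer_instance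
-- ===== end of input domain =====

-- B replaces A's counting DFS (four startswith candidates tried and summed at
-- every position) by a boolean scan that dispatches on the first character via
-- a dict to the unique possible sound; objective: alternative.

-- ===== PORT A =====
-- dfs(target, prev_word): the 'for sound in baby' loop is unrolled over the
-- literal 4-element list baby = ['aya','ye','woo','ma']; target[len(sound):]
-- is the nonnegative slice target.drop len(sound) (exact for 0 ≤ start).
def pvDfsA (target prev : List Char) : Int :=
  if h : target = [] then 1
  else
    (if PySem.Chars.startswith target "aya".toList = true ∧ prev ≠ "aya".toList then
        pvDfsA (target.drop 3) "aya".toList else 0)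
    + (if PySem.Chars.startswith target "ye".toList = true ∧ prev ≠ "ye".toList then
        pvDfsA (target.drop 2) "ye".toList else 0)
    + (if PySem.Chars.startswith target "woo".toList = true ∧ prev ≠ "woo".toList then
        pvDfsA (target.drop 3) "woo".toList else 0)
    + (if PySem.Chars.startswith target "ma".toList = true ∧ prev ≠ "ma".toList then
        pvDfsA (target.drop 2) "ma".toList else 0)
termination_by target.length
decreasing_by
  all_goals
    have := List.length_pos_iff.mpr h
    simp [List.length_drop]
    omega

def solution (babbling : List String) : Int :=
  (babbling.foldl (fun rlt target => rlt ++ [pvDfsA target.toList []]) []).sum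

-- ===== PORT B =====
-- step = {'a': 'aya', 'y': 'ye', 'w': 'woo', 'm': 'ma'}: a 4-entry dict with
-- literal keys, ported as a direct function Char → Option (List Char)
-- ('step.get' = pvStep; none = key absent).
def pvStep (c : Char) : Option (List Char) :=
  if c = 'a' then some ['a', 'y', 'a']
  else if c = 'y' then some ['y', 'e']
  else if c = 'w' then some ['w', 'o', 'o']
  else if c = 'm' then some ['m', 'a']
  else none

-- ok(s, prev): recursion on the suffix; s[0] is the head (s nonempty in that
-- branch), s.startswith(w) is w.isPrefixOf, s[len(w):] is drop.
def pvOk (s prev : List Char) : Bool :=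
  match s with
  | [] => true
  | c :: cs =>
    match h : pvStep c with
    | none => false
    | some w =>
      if w = prev ∨ ¬ (w.isPrefixOf (c :: cs) = true) then false
      else pvOk ((c :: cs).drop w.length) w
termination_by s.length
decreasing_by
  have hw : 0 < w.length := by
    unfold pvStep at h
    split_ifs at h
    all_goals first
      | exact Option.noConfusion h
      | (rw [← Option.some.inj h]; decide)
  simp only [List.length_drop, List.length_cons]
  omega

-- sum(1 for s in babbling if ok(s, '')) = the count of valid words
def solution_alt (babbling : List String) : Int :=
  (babbling.countP (fun s => pvOk s.toList []) : Int)

-- ===== PRECONDITION & SPEC =====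
def Spec_solution (babbling : List String) (out : Int) : Prop := out = solution_alt babbling
instance (babbling : List String) (out : Int) : Decidable (Spec_solution babbling out) := by unfold Spec_solution; infer_instance

-- ===== CLAIM =====
def Claim_equal_solution : Prop := ∀ (babbling : List String), Dom_solution babbling → Spec_solution babbling (solution babbling)

-- ===== LEMMAS AND PROOFS =====

lemma pv_aya : "aya".toList = ['a','y','a'] := by decide
lemma pv_ye : "ye".toList = ['y','e'] := by decide
lemma pv_woo : "woo".toList = ['w','o','o'] := by decide
lemma pv_ma : "ma".toList = ['m','a'] := by decide

-- central invariant: A's dfs count is B's boolean scan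
lemma pv_dfs_eq (n : Nat) : ∀ t prev : List Char, t.length ≤ n →
    pvDfsA t prev = (if pvOk t prev then 1 else 0) := by
  induction n with
  | zero =>
    intro t prev h
    have ht : t = [] := by cases t with
      | nil => rfl
      | cons a l => simp at h
    subst ht
    rw [pvDfsA, pvOk]; simp
  | succ n ih =>
    intro t prev h
    cases t with
    | nil => rw [pvDfsA, pvOk]; simp
    | cons c cs =>
      have hne : (c :: cs : List Char) ≠ [] := by simp
      have hlen : cs.length + 1 ≤ n + 1 := by simpa using h
      have h3 : ((c :: cs).drop 3).length ≤ n := by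
        simp only [List.length_drop, List.length_cons]; omega
      have h2 : ((c :: cs).drop 2).length ≤ n := by
        simp only [List.length_drop, List.length_cons]; omega
      rw [pvDfsA]
      simp only [dif_neg hne, pv_aya, pv_ye, pv_woo, pv_ma]
      rw [pvOk]
      by_cases hca : c = 'a'
      · subst hca
        by_cases p1 : (['y','a'] : List Char) <+: cs
        · by_cases hprev : prev = ['a','y','a']
          · simp [pvStep, PySem.Chars.startswith_iff, p1, hprev]
          · simp [pvStep, PySem.Chars.startswith_iff, p1, hprev,
              Ne.symm hprev]
            exact ih _ _ (by simp; omega)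
        · simp [pvStep, PySem.Chars.startswith_iff, p1]
      · by_cases hcy : c = 'y'
        · subst hcy
          by_cases p2 : (['e'] : List Char) <+: cs
          · by_cases hprev : prev = ['y','e']
            · simp [pvStep, PySem.Chars.startswith_iff, p2, hprev]
            · simp [pvStep, PySem.Chars.startswith_iff, p2, hprev,
                Ne.symm hprev]
              exact ih _ _ (by simp; omega)
          · simp [pvStep, PySem.Chars.startswith_iff, p2]
        · by_cases hcw : c = 'w'
          · subst hcw
            by_cases p3 : (['o','o'] : List Char) <+: cs
            · by_cases hprev : prev = ['w','o','o']
              · simp [pvStep, PySem.Chars.startswith_iff, p3, hprev]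
              · simp [pvStep, PySem.Chars.startswith_iff, p3, hprev,
                  Ne.symm hprev]
                exact ih _ _ (by simp; omega)
            · simp [pvStep, PySem.Chars.startswith_iff, p3]
          · by_cases hcm : c = 'm'
            · subst hcm
              by_cases p4 : (['a'] : List Char) <+: cs
              · by_cases hprev : prev = ['m','a']
                · simp [pvStep, PySem.Chars.startswith_iff, p4, hprev]
                · simp [pvStep, PySem.Chars.startswith_iff, p4, hprev,
                    Ne.symm hprev]
                  exact ih _ _ (by simp; omega)
              · simp [pvStep, PySem.Chars.startswith_iff, p4]
            · -- no sound starts with c: all four fail on both sides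
              have hnone : pvStep c = none := by simp [pvStep, hca, hcy, hcw, hcm]
              simp [PySem.Chars.startswith_iff,
                Ne.symm hca, Ne.symm hcy, Ne.symm hcw, Ne.symm hcm]
              split
              next => rfl
              next w heq => rw [hnone] at heq; simp at heq

lemma pv_sum_foldl (l : List String) (r : List Int) :
    (l.foldl (fun rlt target => rlt ++ [pvDfsA target.toList []]) r).sum
      = r.sum + (l.map (fun s => pvDfsA s.toList [])).sum := by
  induction l generalizing r with
  | nil => simp
  | cons a l ih =>
    rw [List.foldl_cons, ih, List.map_cons, List.sum_cons, List.sum_append]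
    simp
    ring

lemma pv_map_countP (l : List String) :
    (l.map (fun s => if pvOk s.toList [] then (1 : Int) else 0)).sum
      = (l.countP (fun s => pvOk s.toList []) : Int) := by
  induction l with
  | nil => simp
  | cons a l ih =>
    rw [List.map_cons, List.sum_cons, ih, List.countP_cons]
    by_cases h : pvOk a.toList [] = true <;> simp [h] <;> ring

-- ===== VERDICT =====
theorem solution_spec : Claim_equal_solution := by
  intro babbling _
  unfold Spec_solution solution solution_alt
  rw [pv_sum_foldl]
  simp only [List.sum_nil, zero_add]
  rw [← pv_map_countP]
  congr 1
  apply List.map_congr_left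
  intro s _
  exact pv_dfs_eq s.toList.length s.toList [] le_rfl
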